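-- pv_equiv track=rewrite | github.com/chanderlud/cscd499-genai | research/agents/evolve_problems_agent.py | _extract_source_title
-- ===== SOURCE A (Python) =====
-- def _extract_source_title(problem_md: str, source_id: str) -> str:
--     for line in problem_md.splitlines():
--         stripped = line.strip()
--         if stripped.startswith("TITLE:"):
--             title = stripped[len("TITLE:") :].strip()
--             if title:
--                 return title
--             break
--     for line in problem_md.splitlines():
--         stripped = line.strip()
--         if not stripped:
--             continue
--         if stripped.startswith("#"):
--             stripped = stripped.lstrip("#").strip()
--         if stripped:
--             return stripped
--     return f"Source {source_id}"
-- ===== SOURCE B (Python) =====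
-- def _extract_source_title(problem_md: str, source_id: str) -> str:
--     title_seen = False
--     fallback = None
--     for line in problem_md.splitlines():
--         stripped = line.strip()
--         if not title_seen and stripped.startswith("TITLE:"):
--             title_seen = True
--             title = stripped[len("TITLE:"):].strip()
--             if title:
--                 return title
--         if fallback is None and stripped:
--             cand = stripped
--             if cand.startswith("#"):
--                 cand = cand.lstrip("#").strip()
--             if cand:
--                 fallback = cand
--     return fallback if fallback is not None else f"Source {source_id}"
-- ===== Notes on version B (the rewrite author's own statement) =====
-- stated objective: simpler
-- what changed: Replaces A's two separate passes over splitlines (TITLE scan, then fallback scan) with a single loop that tracks a title_seen flag and a first-fallback accumulator and short-circuits on a non-empty TITLE.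
import Mathlib
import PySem

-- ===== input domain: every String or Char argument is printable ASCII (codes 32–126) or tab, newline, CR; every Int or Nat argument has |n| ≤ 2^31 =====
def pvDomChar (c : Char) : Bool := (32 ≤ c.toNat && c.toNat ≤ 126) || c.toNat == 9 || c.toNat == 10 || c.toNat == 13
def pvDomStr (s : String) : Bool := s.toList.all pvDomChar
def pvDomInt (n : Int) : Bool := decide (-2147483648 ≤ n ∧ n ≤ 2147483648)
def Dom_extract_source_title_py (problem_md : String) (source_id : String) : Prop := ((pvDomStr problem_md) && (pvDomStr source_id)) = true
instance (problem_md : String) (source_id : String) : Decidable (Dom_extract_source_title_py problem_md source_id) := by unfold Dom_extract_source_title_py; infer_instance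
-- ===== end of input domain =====

-- B replaces A's two passes over the lines by one loop with a title_seen flag and a fallback accumulator (objective: simpler).

-- hand port of Python's s.lstrip("#"): drop leading '#' characters (exact: lstrip with a chars
-- argument removes exactly the leading characters belonging to that set)
def pvLstripHash (s : String) : String := String.ofList (s.toList.dropWhile (· == '#'))

-- ===== PORT A =====
-- first for-loop of A: returns the title if the loop `return`s, none if it `break`s or falls through
def pvAPass1 : List String → Option String
  | [] => none
  | l :: ls =>
    let stripped := PySem.Str.strip l
    if PySem.Str.startswith stripped "TITLE:" then
      let title := PySem.Str.strip (PySem.Str.slice stripped (some 6) none)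
      if title ≠ "" then some title else none   -- break
    else pvAPass1 ls

-- second for-loop of A: first non-empty line after '#'-stripping, if any
def pvAPass2 : List String → Option String
  | [] => none
  | l :: ls =>
    let stripped := PySem.Str.strip l
    if stripped = "" then pvAPass2 ls           -- continue
    else
      let stripped' := if PySem.Str.startswith stripped "#"
                       then PySem.Str.strip (pvLstripHash stripped) else stripped
      if stripped' ≠ "" then some stripped' else pvAPass2 ls

def extract_source_title_py (problem_md : String) (source_id : String) : String :=
  match pvAPass1 (PySem.Str.splitlines problem_md) with
  | some t => t
  | none =>
    match pvAPass2 (PySem.Str.splitlines problem_md) with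
    | some s => s
    | none => "Source " ++ source_id

-- ===== PORT B =====
-- the `if fallback is None and stripped:` block of Source B
def pvBFb (fb : Option String) (stripped : String) : Option String :=
  if fb.isNone && stripped ≠ "" then
    let cand := if PySem.Str.startswith stripped "#"
                then PySem.Str.strip (pvLstripHash stripped) else stripped
    if cand ≠ "" then some cand else fb
  else fb

-- the single for-loop of Source B, state = (title_seen, fallback)
def pvBLoop (source_id : String) : List String → Bool → Option String → String
  | [], _, fb => match fb with | some f => f | none => "Source " ++ source_id
  | l :: ls, seen, fb =>
    let stripped := PySem.Str.strip l
    if !seen && PySem.Str.startswith stripped "TITLE:" then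
      let title := PySem.Str.strip (PySem.Str.slice stripped (some 6) none)
      if title ≠ "" then title
      else pvBLoop source_id ls true (pvBFb fb stripped)
    else pvBLoop source_id ls seen (pvBFb fb stripped)

def extract_source_title_py_alt (problem_md : String) (source_id : String) : String :=
  pvBLoop source_id (PySem.Str.splitlines problem_md) false none

-- ===== PRECONDITION & SPEC =====
def Spec_extract_source_title_py (problem_md : String) (source_id : String) (out : String) : Prop := out = extract_source_title_py_alt problem_md source_id
instance (problem_md : String) (source_id : String) (out : String) : Decidable (Spec_extract_source_title_py problem_md source_id out) := by unfold Spec_extract_source_title_py; infer_instance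

-- ===== CLAIM (what is proved, stated in full; the proofs are below) =====
def Claim_equal_extract_source_title_py : Prop := ∀ (problem_md : String) (source_id : String), Dom_extract_source_title_py problem_md source_id → Spec_extract_source_title_py problem_md source_id (extract_source_title_py problem_md source_id)

-- ===== LEMMAS AND PROOFS =====

-- the candidate a single line contributes to A's second pass
def pvCand (stripped : String) : Option String :=
  if stripped = "" then none
  else
    let stripped' := if PySem.Str.startswith stripped "#"
                     then PySem.Str.strip (pvLstripHash stripped) else stripped
    if stripped' ≠ "" then some stripped' else none

theorem pvAPass2_cons (l : String) (ls : List String) :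
    pvAPass2 (l :: ls) = (pvCand (PySem.Str.strip l)).orElse (fun _ => pvAPass2 ls) := by
  simp only [pvAPass2, pvCand]
  split_ifs with h1 h2 <;> simp [Option.orElse]

theorem pvBFb_eq (fb : Option String) (st : String) :
    pvBFb fb st = fb.orElse (fun _ => pvCand st) := by
  cases fb <;> simp [pvBFb, pvCand, Option.orElse]

theorem pvBLoop_seen (sid : String) (ls : List String) (fb : Option String) :
    pvBLoop sid ls true fb =
      match fb.orElse (fun _ => pvAPass2 ls) with
      | some s => s
      | none => "Source " ++ sid := by
  induction ls generalizing fb with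
  | nil => cases fb <;> simp [pvBLoop, Option.orElse, pvAPass2]
  | cons l ls ih =>
    simp only [pvBLoop, Bool.not_true, Bool.false_and, if_neg (by simp : ¬ (false = true))]
    rw [ih, pvBFb_eq, pvAPass2_cons]
    cases fb <;> cases pvCand (PySem.Str.strip l) <;> simp [Option.orElse]

theorem pvBLoop_main (sid : String) (ls : List String) (fb : Option String) :
    pvBLoop sid ls false fb =
      match pvAPass1 ls with
      | some t => t
      | none =>
        match fb.orElse (fun _ => pvAPass2 ls) with
        | some s => s
        | none => "Source " ++ sid := by
  induction ls generalizing fb with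
  | nil => cases fb <;> simp [pvBLoop, pvAPass1, Option.orElse, pvAPass2]
  | cons l ls ih =>
    have eA : pvAPass1 (l :: ls) =
        (if PySem.Str.startswith (PySem.Str.strip l) "TITLE:" then
          (if PySem.Str.strip (PySem.Str.slice (PySem.Str.strip l) (some 6) none) ≠ "" then
            some (PySem.Str.strip (PySem.Str.slice (PySem.Str.strip l) (some 6) none)) else none)
        else pvAPass1 ls) := rfl
    have eB : pvBLoop sid (l :: ls) false fb =
        (if !false && PySem.Str.startswith (PySem.Str.strip l) "TITLE:" then
          (if PySem.Str.strip (PySem.Str.slice (PySem.Str.strip l) (some 6) none) ≠ "" then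
            PySem.Str.strip (PySem.Str.slice (PySem.Str.strip l) (some 6) none)
          else pvBLoop sid ls true (pvBFb fb (PySem.Str.strip l)))
        else pvBLoop sid ls false (pvBFb fb (PySem.Str.strip l))) := rfl
    rw [eB]
    by_cases hT : PySem.Str.startswith (PySem.Str.strip l) "TITLE:" = true
    · rw [eA, if_pos hT, if_pos (by simpa using hT)]
      by_cases ht : PySem.Str.strip (PySem.Str.slice (PySem.Str.strip l) (some 6) none) ≠ ""
      · rw [if_pos ht, if_pos ht]
      · rw [if_neg ht, if_neg ht, pvBLoop_seen, pvBFb_eq, pvAPass2_cons]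
        cases fb <;> cases pvCand (PySem.Str.strip l) <;> simp [Option.orElse]
    · rw [eA, if_neg hT, if_neg (by simpa using hT)]
      rw [ih, pvBFb_eq, pvAPass2_cons]
      cases pvAPass1 ls <;> cases fb <;> cases pvCand (PySem.Str.strip l) <;> simp [Option.orElse]
-- ===== VERDICT (by name: the statement is the Claim_ definition above) =====
theorem extract_source_title_py_spec : Claim_equal_extract_source_title_py := by
  intro md sid _
  show extract_source_title_py md sid = extract_source_title_py_alt md sid
  rw [extract_source_title_py, extract_source_title_py_alt, pvBLoop_main]
  cases pvAPass1 (PySem.Str.splitlines md) <;> simp [Option.orElse]
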